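-- pv_equiv track=rewrite | github.com/bbi-lab/bbi-sciatac-analyze | src/get_unique_fragments.py | update_cell_duplicate_counts
-- ===== SOURCE A (Python) =====
-- def update_cell_duplicate_counts(cell_duplicate_counts, fragments_dict):
--     """
--     Updates running dict of cell duplicate counts using fragments dict.
--
--     Args:
--         fragments_dict (OrderedDict): dictionary of (cell, start, end) for fragments to the number of times that fragment was seen
--         cell_duplicate_counts (dict): dict mapping cell ID to [deduplicated_counts, total_counts]
--
--     Returns:
--         dict: updated cell_duplicate_counts accounting for entries in fragments_dict
--     """
--     for fragment in fragments_dict: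
--         duplicate_counts = fragments_dict[fragment]
--         cell = fragment[0]
--
--         if cell not in cell_duplicate_counts:
--             cell_duplicate_counts[cell] = [0, 0]
--
--         cell_duplicate_counts[cell][0] += 1
--         cell_duplicate_counts[cell][1] += duplicate_counts
--
--     return cell_duplicate_counts
-- ===== SOURCE B (Python) =====
-- def update_cell_duplicate_counts(cell_duplicate_counts, fragments_dict):
--     # Phase 1: tally per-cell fragment count and duplicate-count sum.
--     dedup = {}
--     total = {}
--     for fragment, duplicate_counts in fragments_dict.items():
--         cell = fragment[0]
--         dedup[cell] = dedup.get(cell, 0) + 1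
--         total[cell] = total.get(cell, 0) + duplicate_counts
--     # Phase 2: merge the tallies into cell_duplicate_counts (in place).
--     for cell, n in dedup.items():
--         entry = cell_duplicate_counts.setdefault(cell, [0, 0])
--         entry[0] += n
--         entry[1] += total[cell]
--     return cell_duplicate_counts
-- ===== Notes on version B (the rewrite author's own statement) =====
-- stated objective: alternative
-- what changed: A's single interleaved loop (per-fragment membership test, default insertion and in-place list update) is replaced by a two-phase decomposition: one pass tallies per-cell fragment counts and duplicate-count sums into two dicts, a separate second pass merges each distinct cell's tally into cell_duplicate_counts once.
import Mathlib
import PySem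

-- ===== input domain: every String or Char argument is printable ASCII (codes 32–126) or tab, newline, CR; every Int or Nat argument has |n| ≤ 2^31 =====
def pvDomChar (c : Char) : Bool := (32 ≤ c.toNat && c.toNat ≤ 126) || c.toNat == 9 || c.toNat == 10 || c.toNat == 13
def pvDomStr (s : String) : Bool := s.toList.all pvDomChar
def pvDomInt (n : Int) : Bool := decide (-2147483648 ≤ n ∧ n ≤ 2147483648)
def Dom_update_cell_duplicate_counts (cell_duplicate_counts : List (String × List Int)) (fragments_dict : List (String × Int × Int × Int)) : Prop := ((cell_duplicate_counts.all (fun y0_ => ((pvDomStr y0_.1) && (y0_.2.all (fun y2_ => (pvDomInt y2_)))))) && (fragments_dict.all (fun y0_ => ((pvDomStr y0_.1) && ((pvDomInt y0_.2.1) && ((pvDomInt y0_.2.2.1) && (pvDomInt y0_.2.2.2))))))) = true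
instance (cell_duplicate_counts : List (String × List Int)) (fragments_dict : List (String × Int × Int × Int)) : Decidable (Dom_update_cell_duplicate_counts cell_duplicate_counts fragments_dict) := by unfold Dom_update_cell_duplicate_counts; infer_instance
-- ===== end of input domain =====

-- B replaces A's single interleaved look-up/update loop by a two-phase shape (tally two per-cell
-- counters over the fragments, then merge them into cell_duplicate_counts once per distinct cell);
-- the objective is an alternative decomposition, not speed. Equivalence is about the RETURN value
-- only: Python A (and B) mutate the passed cell_duplicate_counts dict in place.

-- ===== PORT A =====
def update_cell_duplicate_counts (cell_duplicate_counts : List (String × List Int)) (fragments_dict : List (String × Int × Int × Int)) : List (String × List Int) :=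
  let ccd : PySem.Dict String (List Int) := PySem.Dict.ofList cell_duplicate_counts
  let fd : PySem.Dict (String × Int × Int) Int :=
    PySem.Dict.ofList (fragments_dict.map (fun q => ((q.1, q.2.1, q.2.2.1), q.2.2.2)))
  (fd.items.foldl (fun d kv =>
      let duplicate_counts := kv.2
      let cell := kv.1.1
      let d := if d.contains cell then d else d.insert cell [0, 0]
      let d := d.modify cell [] (fun l => PySem.List.pySetD l 0 (PySem.List.pyGetD l 0 0 + 1))
      d.modify cell [] (fun l => PySem.List.pySetD l 1 (PySem.List.pyGetD l 1 0 + duplicate_counts)))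
    ccd).items

-- ===== PORT B =====
def update_cell_duplicate_counts_alt (cell_duplicate_counts : List (String × List Int)) (fragments_dict : List (String × Int × Int × Int)) : List (String × List Int) :=
  let fd : PySem.Dict (String × Int × Int) Int :=
    PySem.Dict.ofList (fragments_dict.map (fun q => ((q.1, q.2.1, q.2.2.1), q.2.2.2)))
  -- Phase 1: tally per-cell fragment count and duplicate-count sum
  let tallies : PySem.Dict String Int × PySem.Dict String Int :=
    fd.items.foldl (fun p kv =>
        (p.1.modify kv.1.1 0 (· + 1), p.2.modify kv.1.1 0 (· + kv.2)))
      (PySem.Dict.empty, PySem.Dict.empty)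
  let dedup := tallies.1
  let total := tallies.2
  -- Phase 2: merge the tallies into cell_duplicate_counts
  (dedup.items.foldl (fun d kv =>
      let cell := kv.1
      let d := d.setdefault cell [0, 0]
      d.modify cell [] (fun entry =>
        let entry := PySem.List.pySetD entry 0 (PySem.List.pyGetD entry 0 0 + kv.2)
        PySem.List.pySetD entry 1 (PySem.List.pyGetD entry 1 0 + total.getD cell 0)))
    (PySem.Dict.ofList cell_duplicate_counts)).items

-- ===== PRECONDITION & SPEC =====
-- Pre_ excludes exactly the inputs on which Python A raises IndexError: a fragment's cell already
-- present in cell_duplicate_counts with a value list of length < 2 (A does `[cell][1] += …`).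
def Pre_update_cell_duplicate_counts (cell_duplicate_counts : List (String × List Int)) (fragments_dict : List (String × Int × Int × Int)) : Prop :=
  ∀ p ∈ fragments_dict, 2 ≤ ((PySem.Dict.ofList cell_duplicate_counts).getD p.1 ([0, 0] : List Int)).length
instance (cell_duplicate_counts : List (String × List Int)) (fragments_dict : List (String × Int × Int × Int)) : Decidable (Pre_update_cell_duplicate_counts cell_duplicate_counts fragments_dict) := by unfold Pre_update_cell_duplicate_counts; infer_instance
def pvWitness_update_cell_duplicate_counts : (List (String × List Int)) × (List (String × Int × Int × Int)) :=
  ([("a", [1, 2])], [("a", 0, 5, 3), ("b", 1, 2, 1)])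
def Spec_update_cell_duplicate_counts (cell_duplicate_counts : List (String × List Int)) (fragments_dict : List (String × Int × Int × Int)) (out : List (String × List Int)) : Prop := out = update_cell_duplicate_counts_alt cell_duplicate_counts fragments_dict
instance (cell_duplicate_counts : List (String × List Int)) (fragments_dict : List (String × Int × Int × Int)) (out : List (String × List Int)) : Decidable (Spec_update_cell_duplicate_counts cell_duplicate_counts fragments_dict out) := by unfold Spec_update_cell_duplicate_counts; infer_instance

-- ===== CLAIM (what is proved, stated in full; the proofs are below) =====
def Claim_equal_update_cell_duplicate_counts : Prop := ∀ (cell_duplicate_counts : List (String × List Int)) (fragments_dict : List (String × Int × Int × Int)), Dom_update_cell_duplicate_counts cell_duplicate_counts fragments_dict → Pre_update_cell_duplicate_counts cell_duplicate_counts fragments_dict → Spec_update_cell_duplicate_counts cell_duplicate_counts fragments_dict (update_cell_duplicate_counts cell_duplicate_counts fragments_dict)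

-- ===== LEMMAS AND PROOFS =====

-- The cell of one deduplicated fragment entry
def pvCell (kv : (String × Int × Int) × Int) : String := kv.1.1

-- A's loop body
def pvAstep (d : PySem.Dict String (List Int)) (kv : (String × Int × Int) × Int) : PySem.Dict String (List Int) :=
  let d := if d.contains kv.1.1 then d else d.insert kv.1.1 [0, 0]
  let d := d.modify kv.1.1 [] (fun l => PySem.List.pySetD l 0 (PySem.List.pyGetD l 0 0 + 1))
  d.modify kv.1.1 [] (fun l => PySem.List.pySetD l 1 (PySem.List.pyGetD l 1 0 + kv.2))

-- B's merge-loop body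
def pvBstep (total : PySem.Dict String Int) (d : PySem.Dict String (List Int)) (kv : String × Int) : PySem.Dict String (List Int) :=
  let d := d.setdefault kv.1 [0, 0]
  d.modify kv.1 [] (fun entry =>
    let entry := PySem.List.pySetD entry 0 (PySem.List.pyGetD entry 0 0 + kv.2)
    PySem.List.pySetD entry 1 (PySem.List.pyGetD entry 1 0 + total.getD kv.1 0))

-- adding n to index 0 and s to index 1 (total form)
def pvUpd (l : List Int) (n s : Int) : List Int :=
  PySem.List.pySetD (PySem.List.pySetD l 0 (PySem.List.pyGetD l 0 0 + n)) 1 (PySem.List.pyGetD l 1 0 + s)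

def pvBase (d : PySem.Dict String (List Int)) (c : String) : List Int :=
  if d.contains c then d.getD c [] else [0, 0]

def pvSum (fs : List ((String × Int × Int) × Int)) (c : String) : Int :=
  ((fs.filter (fun kv => pvCell kv == c)).map (fun kv => kv.2)).sum


theorem pvGet1_set0 (l : List Int) (v : Int) :
    PySem.List.pyGetD (PySem.List.pySetD l 0 v) 1 0 = PySem.List.pyGetD l 1 0 := by
  match l with
  | [] => rfl
  | [a] => rfl
  | a :: b :: t =>
    simp [PySem.List.pySetD, PySem.List.pySet?, PySem.List.pyGetD, PySem.List.pyGet?, PySem.List.pyIdx?]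
    split_ifs <;> simp_all

theorem pvUpd_upd (l : List Int) (n1 s1 n2 s2 : Int) :
    pvUpd (pvUpd l n1 s1) n2 s2 = pvUpd l (n1 + n2) (s1 + s2) := by
  match l with
  | [] => rfl
  | [a] =>
    simp [pvUpd, PySem.List.pySetD, PySem.List.pySet?, PySem.List.pyGetD, PySem.List.pyGet?,
      PySem.List.pyIdx?]
    ring
  | a :: b :: t =>
    simp [pvUpd, PySem.List.pySetD, PySem.List.pySet?, PySem.List.pyGetD, PySem.List.pyGet?,
      PySem.List.pyIdx?]
    split_ifs <;> simp_all <;> try constructor <;> try ring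
    all_goals omega

theorem pvAstep_getD (d : PySem.Dict String (List Int)) (kv : (String × Int × Int) × Int) (c : String) :
    (pvAstep d kv).getD c [] = if c = kv.1.1 then pvUpd (pvBase d kv.1.1) 1 kv.2 else d.getD c [] := by
  unfold pvAstep pvBase
  by_cases h : d.contains kv.1.1 = true <;>
    by_cases hc : c = kv.1.1 <;>
      simp [h, hc, PySem.Dict.getD_modify, PySem.Dict.getD_insert, pvUpd, pvGet1_set0]

theorem pvAstep_contains (d : PySem.Dict String (List Int)) (kv : (String × Int × Int) × Int) (c : String) :
    (pvAstep d kv).contains c = (c == kv.1.1 || d.contains c) := by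
  unfold pvAstep
  by_cases h : d.contains kv.1.1 = true <;>
    simp [h, PySem.Dict.contains_modify, PySem.Dict.contains_insert]

theorem pvAstep_keys (d : PySem.Dict String (List Int)) (kv : (String × Int × Int) × Int) :
    (pvAstep d kv).keys = PySem.Set.add d.keys kv.1.1 := by
  unfold pvAstep PySem.Set.add
  by_cases h : d.contains kv.1.1 = true
  · have hm : kv.1.1 ∈ d.keys := (PySem.Dict.contains_iff_mem_keys d kv.1.1).mp h
    simp only [h, if_true]
    rw [PySem.Dict.keys_modify, PySem.Dict.keys_insert_of_contains _ _ (by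
      rw [PySem.Dict.contains_modify]; simp)]
    rw [PySem.Dict.keys_modify, PySem.Dict.keys_insert_of_contains _ _ h]
    simp [PySem.Set.contains]
    exact hm
  · have hm : kv.1.1 ∉ d.keys := fun hmem => h ((PySem.Dict.contains_iff_mem_keys d kv.1.1).mpr hmem)
    simp only [eq_false_of_ne_true h, Bool.false_eq_true, if_false]
    rw [PySem.Dict.keys_modify, PySem.Dict.keys_insert_of_contains _ _ (by
      rw [PySem.Dict.contains_modify]; simp)]
    rw [PySem.Dict.keys_modify, PySem.Dict.keys_insert_of_contains _ _ (by
      rw [PySem.Dict.contains_insert]; simp)]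
    rw [PySem.Dict.keys_insert_of_not_contains _ _ (eq_false_of_ne_true h)]
    simp [PySem.Set.contains]
    exact hm

theorem pvBase_astep (d : PySem.Dict String (List Int)) (kv : (String × Int × Int) × Int) (c : String)
    (hc : c ≠ kv.1.1) : pvBase (pvAstep d kv) c = pvBase d c := by
  unfold pvBase
  rw [pvAstep_contains, pvAstep_getD, if_neg hc]
  simp [beq_eq_false_iff_ne.mpr hc]

theorem pvBstep_getD (T : PySem.Dict String Int) (d : PySem.Dict String (List Int)) (kv : String × Int) (c : String) :
    (pvBstep T d kv).getD c [] = if c = kv.1 then pvUpd (pvBase d kv.1) kv.2 (T.getD kv.1 0) else d.getD c [] := by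
  unfold pvBstep pvBase
  by_cases h : d.contains kv.1 = true <;>
    [rw [PySem.Dict.setdefault_of_contains _ _ h];
     rw [PySem.Dict.setdefault_of_not_contains _ _ (eq_false_of_ne_true h)]] <;>
    by_cases hc : c = kv.1 <;>
      simp [h, hc, PySem.Dict.getD_modify, PySem.Dict.getD_insert, pvUpd, pvGet1_set0]

theorem pvBstep_contains (T : PySem.Dict String Int) (d : PySem.Dict String (List Int)) (kv : String × Int) (c : String) :
    (pvBstep T d kv).contains c = (c == kv.1 || d.contains c) := by
  unfold pvBstep
  rw [PySem.Dict.contains_modify, PySem.Dict.contains_setdefault]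
  cases c == kv.1 <;> simp

theorem pvBstep_keys (T : PySem.Dict String Int) (d : PySem.Dict String (List Int)) (kv : String × Int) :
    (pvBstep T d kv).keys = PySem.Set.add d.keys kv.1 := by
  unfold pvBstep PySem.Set.add
  rw [PySem.Dict.keys_modify, PySem.Dict.keys_insert_of_contains _ _ (by
    rw [PySem.Dict.contains_setdefault]; simp)]
  by_cases h : d.contains kv.1 = true
  · have hm : kv.1 ∈ d.keys := (PySem.Dict.contains_iff_mem_keys d kv.1).mp h
    rw [PySem.Dict.setdefault_of_contains _ _ h]
    simp [PySem.Set.contains]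
    exact hm
  · have hm : kv.1 ∉ d.keys := fun hmem => h ((PySem.Dict.contains_iff_mem_keys d kv.1).mpr hmem)
    rw [PySem.Dict.setdefault_of_not_contains _ _ (eq_false_of_ne_true h)]
    rw [PySem.Dict.keys_insert_of_not_contains _ _ (eq_false_of_ne_true h)]
    simp [PySem.Set.contains]
    exact hm

theorem pvBase_bstep (T : PySem.Dict String Int) (d : PySem.Dict String (List Int)) (kv : String × Int) (c : String)
    (hc : c ≠ kv.1) : pvBase (pvBstep T d kv) c = pvBase d c := by
  unfold pvBase
  rw [pvBstep_contains, pvBstep_getD, if_neg hc]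
  simp [beq_eq_false_iff_ne.mpr hc]

theorem pvBase_astep_self (d : PySem.Dict String (List Int)) (kv : (String × Int × Int) × Int) :
    pvBase (pvAstep d kv) kv.1.1 = pvUpd (pvBase d kv.1.1) 1 kv.2 := by
  by_cases h : d.contains kv.1.1 = true <;>
    simp [pvBase, pvAstep_contains, pvAstep_getD, h]

-- ===== A-side fold characterization =====

theorem pvAfold_getD (fs : List ((String × Int × Int) × Int)) :
    ∀ (d : PySem.Dict String (List Int)) (c : String),
      (fs.foldl pvAstep d).getD c [] =
        if c ∈ fs.map pvCell then
          pvUpd (pvBase d c) ((fs.map pvCell).count c) (pvSum fs c)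
        else d.getD c [] := by
  induction fs with
  | nil => intro d c; simp
  | cons x fs ih =>
    intro d c
    rw [List.foldl_cons, ih]
    by_cases hc : c = x.1.1
    · subst hc
      by_cases hmem : x.1.1 ∈ fs.map pvCell
      · rw [if_pos hmem, if_pos (by simp [pvCell])]
        rw [pvBase_astep_self, pvUpd_upd]
        congr 1
        · congr 1
          · simp [pvCell, List.count_cons]; push_cast; ring
        · simp [pvSum, pvCell, List.filter_cons]
      · rw [if_neg hmem, if_pos (by simp [pvCell])]
        rw [pvAstep_getD, if_pos rfl]
        have hcnt : ((((x :: fs).map pvCell).count x.1.1 : Nat) : Int) = 1 := by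
          have h0 : (fs.map pvCell).count x.1.1 = 0 := List.count_eq_zero.mpr hmem
          simp [pvCell, List.count_cons, h0]
        have hsum : pvSum (x :: fs) x.1.1 = x.2 := by
          have h0 : pvSum fs x.1.1 = 0 := by
            unfold pvSum
            rw [List.filter_eq_nil_iff.mpr ?_]
            · rfl
            · intro a ha hb
              exact hmem (List.mem_map.mpr ⟨a, ha, (beq_iff_eq.mp hb)⟩)
          have : pvSum (x :: fs) x.1.1 = x.2 + pvSum fs x.1.1 := by
            simp [pvSum, pvCell, List.filter_cons]
          rw [this, h0, add_zero]
        rw [hcnt, hsum]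
    · rw [pvBase_astep d x c hc, pvAstep_getD, if_neg hc]
      have hmem : (c ∈ (x :: fs).map pvCell) ↔ (c ∈ fs.map pvCell) := by
        simp [pvCell, hc]
      have hcnt : ((x :: fs).map pvCell).count c = (fs.map pvCell).count c := by
        simp [pvCell, List.count_cons, (Ne.symm hc : x.1.1 ≠ c)]
      have hsum : pvSum (x :: fs) c = pvSum fs c := by
        simp [pvSum, pvCell, List.filter_cons, beq_eq_false_iff_ne.mpr (fun h => hc h.symm)]
      by_cases hm2 : c ∈ fs.map pvCell
      · rw [if_pos hm2, if_pos (hmem.mpr hm2), hcnt, hsum]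
      · rw [if_neg hm2, if_neg (fun h => hm2 (hmem.mp h))]

theorem pvAfold_keys (fs : List ((String × Int × Int) × Int)) :
    ∀ (d : PySem.Dict String (List Int)),
      (fs.foldl pvAstep d).keys = PySem.Set.update d.keys (fs.map pvCell) := by
  induction fs with
  | nil => intro d; simp [PySem.Set.update]
  | cons x fs ih =>
    intro d
    rw [List.foldl_cons, ih, List.map_cons, PySem.Set.update_cons, pvAstep_keys]
    have hx : pvCell x = x.1.1 := rfl
    rw [hx]

-- ===== B-side characterizations =====

theorem pvFoldl_pair {A B C : Type} (l : List A) (f : B → A → B) (g : C → A → C) :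
    ∀ (b : B) (c : C),
      l.foldl (fun p x => (f p.1 x, g p.2 x)) (b, c) = (l.foldl f b, l.foldl g c) := by
  induction l with
  | nil => intro b c; rfl
  | cons x l ih => intro b c; rw [List.foldl_cons]; exact ih (f b x) (g c x)

theorem pvTotal_getD (fs : List ((String × Int × Int) × Int)) :
    ∀ (d : PySem.Dict String Int) (c : String),
      (fs.foldl (fun d kv => d.modify kv.1.1 0 (· + kv.2)) d).getD c 0 = d.getD c 0 + pvSum fs c := by
  induction fs with
  | nil => intro d c; simp [pvSum]
  | cons x fs ih =>
    intro d c
    rw [List.foldl_cons, ih, PySem.Dict.getD_modify]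
    by_cases hc : c = x.1.1
    · rw [if_pos hc]
      simp [pvSum, pvCell, List.filter_cons, hc]
      ring
    · rw [if_neg hc]
      simp [pvSum, pvCell, List.filter_cons, beq_eq_false_iff_ne.mpr (fun h => hc h.symm)]

theorem pvBfold_getD (T : PySem.Dict String Int) (L : List (String × Int)) :
    ∀ (d : PySem.Dict String (List Int)) (c : String), (L.map Prod.fst).Nodup →
      (L.foldl (pvBstep T) d).getD c [] =
        (match (PySem.Dict.mk L).get? c with
         | some dc => pvUpd (pvBase d c) dc (T.getD c 0)
         | none => d.getD c []) := by
  induction L with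
  | nil => intro d c _; simp [PySem.Dict.get?]
  | cons x L ih =>
    intro d c hnd
    rw [List.map_cons, List.nodup_cons] at hnd
    rw [List.foldl_cons, ih _ _ hnd.2, PySem.Dict.get?_mk_cons]
    by_cases hc : x.1 = c
    · have hnone : (PySem.Dict.mk L).get? c = none := by
        rw [PySem.Dict.get?_eq_none_iff_not_mem_keys, PySem.Dict.keys_mk, ← hc]
        exact hnd.1
      simp only [hnone, beq_iff_eq, hc, if_true]
      rw [pvBstep_getD, if_pos hc.symm, hc]
    · simp only [beq_iff_eq, hc, if_false]
      rcases hg : (PySem.Dict.mk L).get? c with _ | dc <;>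
        simp [hg, pvBase_bstep T d x c (Ne.symm hc), pvBstep_getD, Ne.symm hc]

theorem pvBfold_keys (T : PySem.Dict String Int) (L : List (String × Int)) :
    ∀ (d : PySem.Dict String (List Int)),
      (L.foldl (pvBstep T) d).keys = PySem.Set.update d.keys (L.map Prod.fst) := by
  induction L with
  | nil => intro d; simp [PySem.Set.update]
  | cons x L ih =>
    intro d
    rw [List.foldl_cons, ih, List.map_cons, PySem.Set.update_cons, pvBstep_keys]

theorem pvOfList_idem {A : Type} [BEq A] [LawfulBEq A] (xs : List A) :
    PySem.Set.ofList (PySem.Set.ofList xs) = PySem.Set.ofList xs := by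
  rw [← PySem.Set.update_empty, PySem.Set.update_eq_append_of_disjoint _ _
    (PySem.Set.nodup_ofList xs) (by intro x _ h; simp [PySem.Set.empty] at h)]
  rfl

theorem pvUpdate_ofList {A : Type} [BEq A] [LawfulBEq A] (s : PySem.Set A) (xs : List A) :
    PySem.Set.update s (PySem.Set.ofList xs) = PySem.Set.update s xs := by
  rw [PySem.Set.update_eq_append_filter, PySem.Set.update_eq_append_filter, pvOfList_idem]

theorem pvCore (d0 : PySem.Dict String (List Int)) (hnd : d0.keys.Nodup)
    (fs : List ((String × Int × Int) × Int)) :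
    (fs.foldl pvAstep d0).items =
      (((PySem.Dict.counter (fs.map pvCell)).items.foldl
          (pvBstep (fs.foldl (fun d kv => d.modify kv.1.1 0 (· + kv.2)) PySem.Dict.empty)) d0)).items := by
  have hT : ∀ c, (fs.foldl (fun d kv => d.modify kv.1.1 0 (· + kv.2)) PySem.Dict.empty).getD c 0 = pvSum fs c := by
    intro c
    rw [pvTotal_getD]
    simp [PySem.Dict.getD_empty]
  set T := fs.foldl (fun d kv => d.modify kv.1.1 0 (· + kv.2)) PySem.Dict.empty with hTdef
  set cls := fs.map pvCell with hcls
  set ded := PySem.Dict.counter cls with hded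
  have hdk : ded.items.map Prod.fst = PySem.Set.ofList cls := by
    have : ded.items.map Prod.fst = ded.keys := rfl
    rw [this, PySem.Dict.keys_counter]
  have hndded : (ded.items.map Prod.fst).Nodup := by
    rw [hdk]; exact PySem.Set.nodup_ofList cls
  -- keys agree
  have hkeys : (fs.foldl pvAstep d0).keys = (ded.items.foldl (pvBstep T) d0).keys := by
    rw [pvAfold_keys, pvBfold_keys, hdk, pvUpdate_ofList]
  -- values agree
  have hget : ∀ c, (fs.foldl pvAstep d0).getD c [] = (ded.items.foldl (pvBstep T) d0).getD c [] := by
    intro c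
    rw [pvAfold_getD, pvBfold_getD T ded.items d0 c hndded]
    have heta : (PySem.Dict.mk ded.items) = ded := rfl
    rw [heta]
    by_cases hmem : c ∈ cls
    · rw [if_pos hmem]
      rcases hg : ded.get? c with _ | dc
      · rw [PySem.Dict.get?_eq_none_iff_contains, hded, PySem.Dict.contains_counter] at hg
        rw [List.contains_iff_mem.mpr hmem] at hg
        simp at hg
      · have hdc : dc = ((cls.count c : Nat) : Int) := by
          have h1 : ded.getD c 0 = dc := by
            rw [PySem.Dict.getD_eq_get?_getD, hg]; rfl
          rw [← h1, hded, PySem.Dict.getD_counter]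
        rw [hdc, hT c]
    · rw [if_neg hmem]
      have hg : ded.get? c = none := by
        rw [PySem.Dict.get?_eq_none_iff_contains, hded, PySem.Dict.contains_counter]
        exact Bool.eq_false_iff.mpr (fun h => hmem (List.contains_iff_mem.mp h))
      rw [hg]
  -- nodup keys on both sides
  have hndA : (fs.foldl pvAstep d0).keys.Nodup := by
    rw [pvAfold_keys]; exact PySem.Set.nodup_update _ _ hnd
  have hndB : (ded.items.foldl (pvBstep T) d0).keys.Nodup := by
    rw [pvBfold_keys]; exact PySem.Set.nodup_update _ _ hnd
  rw [PySem.Dict.items_eq_map_keys _ hndA ([] : List Int),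
      PySem.Dict.items_eq_map_keys _ hndB ([] : List Int), hkeys]
  exact List.map_congr_left (fun k _ => by rw [hget k])

theorem update_cell_duplicate_counts_spec : Claim_equal_update_cell_duplicate_counts := by
  intro ccd fdl _ _
  unfold Spec_update_cell_duplicate_counts
  simp only [update_cell_duplicate_counts, update_cell_duplicate_counts_alt]
  rw [pvFoldl_pair ((PySem.Dict.ofList (fdl.map (fun q => ((q.1, q.2.1, q.2.2.1), q.2.2.2)))).items)
    (fun (d : PySem.Dict String Int) kv => d.modify kv.1.1 0 (· + 1))
    (fun (d : PySem.Dict String Int) kv => d.modify kv.1.1 0 (· + kv.2))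
    PySem.Dict.empty PySem.Dict.empty]
  simp only []
  have hded : ((PySem.Dict.ofList (fdl.map (fun q => ((q.1, q.2.1, q.2.2.1), q.2.2.2)))).items.foldl
      (fun (d : PySem.Dict String Int) kv => d.modify kv.1.1 0 (· + 1)) PySem.Dict.empty) =
      PySem.Dict.counter ((PySem.Dict.ofList (fdl.map (fun q => ((q.1, q.2.1, q.2.2.1), q.2.2.2)))).items.map pvCell) := by
    rw [PySem.Dict.counter_eq_foldl, List.foldl_map]
    rfl
  rw [hded]
  exact pvCore (PySem.Dict.ofList ccd) (PySem.Dict.nodup_keys_ofList ccd)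
    ((PySem.Dict.ofList (fdl.map (fun q => ((q.1, q.2.1, q.2.2.1), q.2.2.2)))).items)
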